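-- pv_equiv track=rewrite | github.com/Lolita05/python_homework | test/gene_search.py | findNextStopCodon
-- ===== SOURCE A (Python) =====
-- def findNextCodon(seq, start, codon):
--     # Прыгаем по триплетам
--     for i in range(start, len(seq), 3):
--         # Проверяем, является ли кодон стартовым
--         if seq[i:i+3] == codon:
--             # Возвращаем индекс стартового кодона
--             return i
--     return None
--
-- def findNextStopCodon(seq, start):
--     stopCodons = ['TAG', 'TGA', 'TAA']
--     # Делаем все заглавными
--     seq = seq.upper()
--     # Определяем список результатов
--     results = []
--     # Перебираем стоп кодоны
--     for stopCodon in stopCodons: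
--         # Находим индекс следующего стоп кодона
--         pos = findNextCodon(seq, start, stopCodon)
--         # Проверка, найден ли кодон
--         if pos != None:
--             # Добавляем стартовую позицию стоп кодона
--             results.append(pos)
--     if len(results) > 0:
--         return min(results)
--     else:
--         return None
-- ===== SOURCE B (Python) =====
-- def findNextStopCodon(seq, start):
--     seq = seq.upper()
--     for i in range(start, len(seq), 3):
--         if seq[i:i+3] in ('TAG', 'TGA', 'TAA'):
--             return i
--     return None
-- ===== Notes on version B (the rewrite author's own statement) =====
-- stated objective: faster
-- what changed: Replaces three separate whole-sequence scans (one per stop codon) followed by min(results) with a single pass over the triplet grid that returns at the first matching codon.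
import Mathlib
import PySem

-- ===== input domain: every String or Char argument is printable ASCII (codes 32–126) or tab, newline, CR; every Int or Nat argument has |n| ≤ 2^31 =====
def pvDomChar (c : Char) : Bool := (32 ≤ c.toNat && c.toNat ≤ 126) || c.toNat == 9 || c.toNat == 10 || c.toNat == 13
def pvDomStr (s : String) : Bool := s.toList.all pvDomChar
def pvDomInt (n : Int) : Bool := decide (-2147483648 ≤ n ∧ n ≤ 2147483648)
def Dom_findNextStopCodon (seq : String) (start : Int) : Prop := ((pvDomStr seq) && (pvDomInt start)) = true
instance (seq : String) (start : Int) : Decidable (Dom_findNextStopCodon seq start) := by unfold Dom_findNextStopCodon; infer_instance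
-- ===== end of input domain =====

-- B replaces A's three separate per-codon scans plus min() with one single pass over the
-- triplet grid returning at the first matching stop codon (objective: faster, constant factor).


-- ===== PORT A =====
-- helper findNextCodon: walk over the (already materialised) index grid, compare seq[i:i+3] == codon
def pvFindCodonA (s : List Char) (codon : List Char) : List Int → Option Int
  | [] => none
  | i :: rest =>
      if PySem.List.slice s (some i) (some (i + 3)) = codon then some i
      else pvFindCodonA s codon rest

def pvStopCodonsA : List (List Char) := [['T','A','G'], ['T','G','A'], ['T','A','A']]

def findNextStopCodon (seq : String) (start : Int) : Option Int :=
  let s := PySem.Chars.upper seq.toList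
  let grid := PySem.List.pyRange start (s.length : Int) 3
  let results := pvStopCodonsA.foldl
    (fun acc codon =>
      match pvFindCodonA s codon grid with
      | some p => acc ++ [p]
      | none => acc) []
  if results.length > 0 then PySem.List.min? results (fun x => x) else none

-- ===== PORT B =====
-- single pass: first grid index whose triplet slice is in the stop-codon tuple
def pvScanB (s : List Char) (stops : List (List Char)) : List Int → Option Int
  | [] => none
  | i :: rest =>
      if PySem.List.slice s (some i) (some (i + 3)) ∈ stops then some i
      else pvScanB s stops rest

def findNextStopCodon_alt (seq : String) (start : Int) : Option Int :=
  let s := PySem.Chars.upper seq.toList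
  pvScanB s [['T','A','G'], ['T','G','A'], ['T','A','A']]
    (PySem.List.pyRange start (s.length : Int) 3)

-- ===== PRECONDITION & SPEC =====
def Spec_findNextStopCodon (seq : String) (start : Int) (out : Option Int) : Prop := out = findNextStopCodon_alt seq start
instance (seq : String) (start : Int) (out : Option Int) : Decidable (Spec_findNextStopCodon seq start out) := by unfold Spec_findNextStopCodon; infer_instance

-- ===== CLAIM (what is proved, stated in full; the proofs are below) =====
def Claim_equal_findNextStopCodon : Prop := ∀ (seq : String) (start : Int), Dom_findNextStopCodon seq start → Spec_findNextStopCodon seq start (findNextStopCodon seq start)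

-- ===== LEMMAS AND PROOFS =====

-- a position returned by A's per-codon scan lies on the scanned grid
lemma pvFindCodonA_mem {s codon : List Char} : ∀ {rs : List Int} {p : Int},
    pvFindCodonA s codon rs = some p → p ∈ rs := by
  intro rs
  induction rs with
  | nil => intro p h; simp [pvFindCodonA] at h
  | cons i t ih =>
    intro p h
    simp only [pvFindCodonA] at h
    split at h
    · simp at h; simp [h]
    · exact List.mem_cons_of_mem _ (ih h)

-- Python min of a nonempty int list whose least element is i
lemma pvMin?_eq_of_min {l : List Int} {i : Int} (hi : i ∈ l) (hall : ∀ x ∈ l, i ≤ x) :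
    PySem.List.min? l (fun x => x) = some i := by
  cases hm : PySem.List.min? l (fun x => x) with
  | none =>
    rw [PySem.List.min?_eq_none_iff] at hm
    subst hm; simp at hi
  | some m =>
    have h1 : m ≤ i := PySem.List.min?_isMin hm i hi
    have h2 : i ≤ m := hall m (PySem.List.min?_mem hm)
    rw [le_antisymm h1 h2]

-- core: over any ≤-sorted grid, min over A's three per-codon first hits = B's single-pass first hit
lemma pvKey (s : List Char) (c1 c2 c3 : List Char)
    (h12 : c1 ≠ c2) (h13 : c1 ≠ c3) (h23 : c2 ≠ c3) :
    ∀ rs : List Int, rs.Pairwise (· ≤ ·) →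
    PySem.List.min?
      (([c1, c2, c3]).foldl
        (fun acc codon =>
          match pvFindCodonA s codon rs with
          | some p => acc ++ [p]
          | none => acc) []) (fun x => x)
      = pvScanB s [c1, c2, c3] rs := by
  intro rs
  induction rs with
  | nil => intro _; simp [pvFindCodonA, pvScanB, PySem.List.min?]
  | cons i t ih =>
    intro hp
    have hle : ∀ x ∈ t, i ≤ x := (List.pairwise_cons.mp hp).1
    have iht := ih (List.pairwise_cons.mp hp).2
    simp only [List.foldl] at iht ⊢
    by_cases h1 : PySem.List.slice s (some i) (some (i + 3)) = c1
    · simp only [pvScanB, pvFindCodonA, h1,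
        if_neg h12, if_neg h13, List.mem_cons, true_or, if_true]
      rcases e2 : pvFindCodonA s c2 t with _ | p2 <;>
        rcases e3 : pvFindCodonA s c3 t with _ | p3 <;>
        · apply pvMin?_eq_of_min <;> simp_all
          try constructor
          all_goals first
            | exact le_refl i
            | exact hle _ (pvFindCodonA_mem e2)
            | exact hle _ (pvFindCodonA_mem e3)
    · by_cases h2 : PySem.List.slice s (some i) (some (i + 3)) = c2
      · have h21 : c2 ≠ c1 := fun h => h12 h.symm
        simp only [pvScanB, pvFindCodonA, h2,
          if_neg h21, if_neg h23, List.mem_cons, true_or, or_true, if_true]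
        rcases e1 : pvFindCodonA s c1 t with _ | p1 <;>
          rcases e3 : pvFindCodonA s c3 t with _ | p3 <;>
          · apply pvMin?_eq_of_min <;> simp_all
            try constructor
            all_goals first
              | exact le_refl i
              | exact hle _ (pvFindCodonA_mem e1)
              | exact hle _ (pvFindCodonA_mem e3)
      · by_cases h3 : PySem.List.slice s (some i) (some (i + 3)) = c3
        · have h31 : c3 ≠ c1 := fun h => h13 h.symm
          have h32 : c3 ≠ c2 := fun h => h23 h.symm
          simp only [pvScanB, pvFindCodonA, h3,
            if_neg h31, if_neg h32, List.mem_cons, true_or, or_true, if_true]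
          rcases e1 : pvFindCodonA s c1 t with _ | p1 <;>
            rcases e2 : pvFindCodonA s c2 t with _ | p2 <;>
            · apply pvMin?_eq_of_min <;> simp_all
              try constructor
              all_goals first
                | exact le_refl i
                | exact hle _ (pvFindCodonA_mem e1)
                | exact hle _ (pvFindCodonA_mem e2)
        · have hnm : PySem.List.slice s (some i) (some (i + 3)) ∉ [c1, c2, c3] := by
            simp [h1, h2, h3]
          simp only [pvScanB, pvFindCodonA, List.foldl, if_neg h1, if_neg h2, if_neg h3,
            if_neg hnm]
          exact iht

-- the step-3 grid is ≤-sorted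
lemma pvGrid_pairwise (a b : Int) : (PySem.List.pyRange a b 3).Pairwise (· ≤ ·) := by
  rw [PySem.List.pyRange_of_pos a b (by norm_num : (0:Int) < 3)]
  refine List.Pairwise.map _ ?_ (List.pairwise_lt_range)
  intro x y hxy
  omega

-- A's trailing 'if len(results) > 0 then min(results) else None' is exactly min?
lemma pvIf_min (l : List Int) :
    (if l.length > 0 then PySem.List.min? l (fun x => x) else none) = PySem.List.min? l (fun x => x) := by
  cases l with
  | nil => simp [PySem.List.min?]
  | cons x t => simp

-- ===== VERDICT (by name: the statement is the Claim_ definition above) =====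
theorem findNextStopCodon_spec : Claim_equal_findNextStopCodon := by
  intro seq start _
  unfold Spec_findNextStopCodon findNextStopCodon findNextStopCodon_alt pvStopCodonsA
  simp only [pvIf_min]
  exact pvKey _ _ _ _ (by decide) (by decide) (by decide) _ (pvGrid_pairwise _ _)
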